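-- pv_equiv track=rewrite | github.com/Granoia/bio331-hw1 | franzese_hw1.py | check_for_repeats
-- ===== SOURCE A (Python) =====
-- def check_for_repeats(edges):
--     """
--     checks whether there are reversed repeats in the edge list, just to check whether get_undirected_edges() worked properly
--     """
--     repeat = False
--     for edge in edges:
--         current_edge = edge
--         for second in edges:
--             if current_edge == [second[1],second[0]]:
--                 repeat = True
--     return repeat
-- ===== SOURCE B (Python) =====
-- def check_for_repeats(edges):
--     E = {tuple(e) for e in edges}
--     R = {(e[1], e[0]) for e in edges}
--     return bool(E & R)
-- ===== Notes on version B (the rewrite author's own statement) =====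
-- stated objective: faster
-- what changed: Replaces the quadratic nested scan with building the set of edges and the set of reversed edges once and testing their intersection for non-emptiness.
-- outside the precondition, e.g. on check_for_repeats([[1]]): A raises IndexError, B raises IndexError
import Mathlib
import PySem

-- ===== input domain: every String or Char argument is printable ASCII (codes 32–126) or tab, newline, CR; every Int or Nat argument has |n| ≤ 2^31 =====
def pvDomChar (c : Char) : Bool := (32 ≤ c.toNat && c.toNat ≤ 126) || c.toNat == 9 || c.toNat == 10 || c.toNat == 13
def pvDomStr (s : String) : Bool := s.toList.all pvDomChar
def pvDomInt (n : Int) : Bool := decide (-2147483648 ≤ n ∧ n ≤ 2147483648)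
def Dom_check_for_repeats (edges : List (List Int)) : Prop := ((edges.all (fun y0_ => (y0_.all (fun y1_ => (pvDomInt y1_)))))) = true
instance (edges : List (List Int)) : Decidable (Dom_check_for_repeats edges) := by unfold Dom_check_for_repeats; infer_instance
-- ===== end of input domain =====

-- B replaces A's O(n^2) nested scan by two sets built once and one intersection test (return value only; neither version mutates its argument).

-- ===== PORT A =====
-- literal port of A's nested loop: flag 'repeat', inner indexing via pyGet? (none = IndexError, excluded by Pre_)
def check_for_repeats (edges : List (List Int)) : Bool :=
  edges.foldl (fun rep edge =>
    edges.foldl (fun r second =>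
      match PySem.List.pyGet? second 1, PySem.List.pyGet? second 0 with
      | some b, some a => if edge = [b, a] then true else r
      | _, _ => r) rep) false

-- ===== PORT B =====
-- revEdge e = (e[1], e[0]) as in Source B's comprehension; none where Python raises (outside Pre_)
def revEdge (e : List Int) : Option (List Int) :=
  (PySem.List.pyGet? e 1).bind fun b => (PySem.List.pyGet? e 0).map fun a => [b, a]

def check_for_repeats_alt (edges : List (List Int)) : Bool :=
  let E := PySem.Set.ofList edges
  let R := PySem.Set.ofList (edges.filterMap revEdge)
  !(PySem.Set.inter E R).isEmpty

-- ===== PRECONDITION & SPEC =====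
-- Pre_ excludes exactly the inputs where Python A raises IndexError: a nonempty list containing an edge of length < 2
-- (the inner loop indexes second[1] for every edge; B raises there too).
def Pre_check_for_repeats (edges : List (List Int)) : Prop := ∀ e ∈ edges, 2 ≤ e.length
instance (edges : List (List Int)) : Decidable (Pre_check_for_repeats edges) := by unfold Pre_check_for_repeats; infer_instance
def pvWitness_check_for_repeats : List (List Int) := [[1, 2], [2, 1], [3, 4]]

def Spec_check_for_repeats (edges : List (List Int)) (out : Bool) : Prop := out = check_for_repeats_alt edges
instance (edges : List (List Int)) (out : Bool) : Decidable (Spec_check_for_repeats edges out) := by unfold Spec_check_for_repeats; infer_instance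

-- ===== CLAIM (what is proved, stated in full; the proofs are below) =====
def Claim_equal_check_for_repeats : Prop := ∀ (edges : List (List Int)), Dom_check_for_repeats edges → Pre_check_for_repeats edges → Spec_check_for_repeats edges (check_for_repeats edges)

-- ===== LEMMAS AND PROOFS =====

-- the inner comparison of A, as a predicate
def hitB (edge second : List Int) : Bool :=
  match PySem.List.pyGet? second 1, PySem.List.pyGet? second 0 with
  | some b, some a => edge = [b, a]
  | _, _ => false

lemma inner_body_eq (edge : List Int) (r : Bool) (second : List Int) :
    (match PySem.List.pyGet? second 1, PySem.List.pyGet? second 0 with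
      | some b, some a => if edge = [b, a] then true else r
      | _, _ => r) = (r || hitB edge second) := by
  unfold hitB
  cases h1 : PySem.List.pyGet? second 1 with
  | none => simp
  | some b =>
    cases h0 : PySem.List.pyGet? second 0 with
    | none => simp
    | some a => by_cases h : edge = [b, a] <;> simp [h]

lemma foldl_or_any {α : Type} (g : α → Bool) :
    ∀ (l : List α) (b : Bool), l.foldl (fun r x => r || g x) b = (b || l.any g) := by
  intro l
  induction l with
  | nil => simp
  | cons x xs ih => intro b; simp [List.foldl_cons, ih, Bool.or_assoc]

lemma portA_eq_any (edges : List (List Int)) :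
    check_for_repeats edges = edges.any (fun edge => edges.any (hitB edge)) := by
  unfold check_for_repeats
  have hin : ∀ (edge : List Int) (rep : Bool),
      edges.foldl (fun r second =>
        (match PySem.List.pyGet? second 1, PySem.List.pyGet? second 0 with
          | some b, some a => if edge = [b, a] then true else r
          | _, _ => r)) rep = (rep || edges.any (hitB edge)) := by
    intro edge rep
    have := foldl_or_any (hitB edge) edges rep
    rw [← this]
    apply List.foldl_ext
    intro r second _
    exact inner_body_eq edge r second
  calc edges.foldl (fun rep edge =>
        edges.foldl (fun r second =>
          (match PySem.List.pyGet? second 1, PySem.List.pyGet? second 0 with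
            | some b, some a => if edge = [b, a] then true else r
            | _, _ => r)) rep) false
      = edges.foldl (fun rep edge => rep || edges.any (hitB edge)) false := by
        apply List.foldl_ext
        intro r edge _
        exact hin edge r
    _ = edges.any (fun edge => edges.any (hitB edge)) := by
        rw [foldl_or_any (fun edge => edges.any (hitB edge)) edges false]; simp

lemma hitB_iff (edge second : List Int) :
    hitB edge second = true ↔ revEdge second = some edge := by
  unfold hitB revEdge
  cases h1 : PySem.List.pyGet? second 1 with
  | none => simp
  | some b =>
    cases h0 : PySem.List.pyGet? second 0 with
    | none => simp
    | some a => simp [eq_comm]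

lemma portB_iff (edges : List (List Int)) :
    check_for_repeats_alt edges = true ↔
      ∃ x, x ∈ edges ∧ ∃ s ∈ edges, revEdge s = some x := by
  unfold check_for_repeats_alt
  rw [Bool.not_eq_true', List.isEmpty_eq_false_iff, Ne, List.eq_nil_iff_forall_not_mem]
  push_neg
  simp only [PySem.Set.mem_inter, PySem.Set.mem_ofList, List.mem_filterMap]

-- ===== VERDICT (by name: the statement is the Claim_ definition above) =====
theorem check_for_repeats_spec : Claim_equal_check_for_repeats := by
  intro edges _ _
  unfold Spec_check_for_repeats
  rw [Bool.eq_iff_iff, portA_eq_any, portB_iff, List.any_eq_true]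
  constructor
  · rintro ⟨edge, he, h⟩
    rcases List.any_eq_true.1 h with ⟨s, hs, hhit⟩
    exact ⟨edge, he, s, hs, (hitB_iff edge s).1 hhit⟩
  · rintro ⟨x, hx, s, hs, hrev⟩
    exact ⟨x, hx, List.any_eq_true.2 ⟨s, hs, (hitB_iff x s).2 hrev⟩⟩
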